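-- pv_equiv track=rewrite | github.com/acscpt/beebtools | src/beebtools/pretty.py | _compactCode
-- ===== SOURCE A (Python) =====
-- from typing import List
--
-- def _compactCode(code: str) -> str:
--     """Strip cosmetic spaces from the code portion of one BASIC line.
--
--     Walks character by character, preserving quoted strings and
--     REM/DATA tails verbatim.  In code regions, runs of spaces are
--     dropped unless both the preceding and following characters are
--     word characters (a-z, 0-9, underscore), which keeps spaces that
--     prevent identifier or keyword merging.
--     """
--     buf: List[str] = []
--     i = 0
--     n = len(code)
--     in_string = False
--     literal_rest = False
--
--     while i < n:
--         ch = code[i]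
--
--         # Inside a quoted string - pass through verbatim.
--         if in_string:
--             buf.append(ch)
--             if ch == '"':
--                 in_string = False
--             i += 1
--             continue
--
--         # After REM or DATA - pass the rest unchanged.
--         if literal_rest:
--             buf.append(ch)
--             i += 1
--             continue
--
--         # Opening quote.
--         if ch == '"':
--             in_string = True
--             buf.append(ch)
--             i += 1
--             continue
--
--         # Detect REM or DATA keywords - everything after is literal.
--         triggered = False
--         for kw in ('REM', 'DATA'):
--             kl = len(kw)
--             if code[i:i + kl] == kw:
--                 buf.append(kw)
--                 i += kl
--                 literal_rest = True
--                 triggered = True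
--                 break
--         if triggered:
--             continue
--
--         # Space run - keep a single space only when both neighbours
--         # are word characters, to prevent keyword/identifier merging.
--         if ch == ' ':
--             prev = buf[-1] if buf else ''
--             j = i
--             while j < n and code[j] == ' ':
--                 j += 1
--             nxt = code[j] if j < n else ''
--             if _isWordChar(prev) and _isWordChar(nxt):
--                 buf.append(' ')
--             i = j
--             continue
--
--         buf.append(ch)
--         i += 1
--
--     return ''.join(buf)
--
-- def _isWordChar(ch: str) -> bool:
--     """Return True if ch is a letter, digit, or underscore."""
--     return ch.isalnum() or ch == '_'
-- ===== SOURCE B (Python) =====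
-- def _isWordChar(ch: str) -> bool:
--     """Return True if ch is a letter, digit, or underscore."""
--     return ch.isalnum() or ch == '_'
--
--
-- def _squeeze(seg: str, nxt: str) -> str:
--     """Collapse space runs inside a pure code segment.
--
--     nxt is the character that follows seg in the original line ('' if
--     none); it supplies the right-hand neighbour for a run of spaces
--     that reaches the end of seg.
--     """
--     out = []
--     k = 0
--     m = len(seg)
--     while k < m:
--         c = seg[k]
--         if c == ' ':
--             j = k
--             while j < m and seg[j] == ' ':
--                 j += 1
--             follow = seg[j] if j < m else nxt
--             if out and _isWordChar(out[-1]) and _isWordChar(follow):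
--                 out.append(' ')
--             k = j
--         else:
--             out.append(c)
--             k += 1
--     return ''.join(out)
--
--
-- def _compactCode(code: str) -> str:
--     """Strip cosmetic spaces from the code portion of one BASIC line.
--
--     Splits the line into alternating code segments and verbatim spans
--     (quoted strings; the whole tail after REM/DATA) by locating the
--     earliest of '"', 'REM', 'DATA' with str.find, squeezes each code
--     segment, and copies the verbatim spans unchanged.
--     """
--     parts = []
--     rest = code
--     while True:
--         cuts = [p for p in (rest.find('"'), rest.find('REM'), rest.find('DATA')) if p != -1]
--         if not cuts:
--             parts.append(_squeeze(rest, ''))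
--             break
--         cut = min(cuts)
--         c = rest[cut]
--         parts.append(_squeeze(rest[:cut], c))
--         if c == '"':
--             body = rest[cut + 1:]
--             close = body.find('"')
--             lit_len = len(body) if close == -1 else close + 1
--             parts.append(rest[cut:cut + 1 + lit_len])
--             rest = rest[cut + 1 + lit_len:]
--         else:
--             parts.append(rest[cut:])
--             break
--     return ''.join(parts)
-- ===== Notes on version B (the rewrite author's own statement) =====
-- stated objective: faster
-- what changed: A's single character-by-character state machine is replaced by a split of the line into code segments and verbatim spans (located with str.find over '"', 'REM', 'DATA'), each code segment space-squeezed independently with the cut character as right-hand neighbour context.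
import Mathlib
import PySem

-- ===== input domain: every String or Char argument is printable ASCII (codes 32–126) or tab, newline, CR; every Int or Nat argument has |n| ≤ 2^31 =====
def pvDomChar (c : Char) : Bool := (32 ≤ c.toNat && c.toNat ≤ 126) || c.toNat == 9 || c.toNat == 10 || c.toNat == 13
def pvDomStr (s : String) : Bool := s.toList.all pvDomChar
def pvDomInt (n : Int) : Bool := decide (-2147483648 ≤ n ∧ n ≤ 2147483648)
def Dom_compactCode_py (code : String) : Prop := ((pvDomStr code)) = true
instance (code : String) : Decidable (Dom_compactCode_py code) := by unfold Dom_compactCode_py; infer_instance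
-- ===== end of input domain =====

-- B replaces A's single character-by-character state machine by a split into code
-- segments and verbatim spans (found with str.find) plus a space-squeezing pass per
-- code segment (measured faster constant-factor in Python via str.find; equivalence proved).

-- ===== PORT A =====

-- _isWordChar ch : Python str.isalnum() or '_'; exact on the ASCII domain.
-- (isW? handles the '' used by A for a missing neighbour: isW? none = false = ''.isalnum().)
def wordChar (c : Char) : Bool := c.isAlphanum || c == '_'

def isW? : Option Char → Bool
  | some c => wordChar c
  | none => false

-- A's while loop; buf is kept reversed (prev = buf.head?); inStr/lit are in_string/literal_rest.
def runA : List Char → Bool → Bool → List Char → List Char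
  | [], _, _, buf => buf.reverse
  | ch :: rtl, inStr, lit, buf =>
    if inStr then runA rtl (ch != '"') lit (ch :: buf)
    else if lit then runA rtl inStr lit (ch :: buf)
    else if ch == '"' then runA rtl true lit (ch :: buf)
    else if (ch :: rtl).take 3 == ['R','E','M'] then
      runA ((ch :: rtl).drop 3) inStr true ('M' :: 'E' :: 'R' :: buf)
    else if (ch :: rtl).take 4 == ['D','A','T','A'] then
      runA ((ch :: rtl).drop 4) inStr true ('A' :: 'T' :: 'A' :: 'D' :: buf)
    else if ch == ' ' then
      -- the inner while j loop: skip the maximal run of spaces (ch itself is one of them)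
      let rest' := rtl.dropWhile (· == ' ')
      let buf' := if isW? buf.head? && isW? rest'.head? then ' ' :: buf else buf
      runA rest' inStr lit buf'
    else runA rtl inStr lit (ch :: buf)
  termination_by l => l.length
  decreasing_by
    all_goals simp_all only [List.length_cons, List.length_drop]
    all_goals try omega
    have := List.length_dropWhile_le (p := (· == ' ')) (l := rtl)
    omega

def compactCode_py (code : String) : String :=
  String.ofList (runA code.toList false false [])

-- ===== PORT B =====

-- str.find(pat): index of the first occurrence, none for -1 (hand port, exact).
def findSub (pat : List Char) : List Char → Option Nat
  | [] => if pat.isEmpty then some 0 else none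
  | c :: rest =>
    if (c :: rest).take pat.length == pat then some 0
    else (findSub pat rest).map (· + 1)

-- min(cuts) over the candidate cut positions that exist (Source B's list + min).
def minCut (l : List Char) : Option Nat :=
  ([findSub ['"'] l, findSub ['R','E','M'] l, findSub ['D','A','T','A'] l].filterMap id).min?

-- _squeeze's while loop; out kept reversed.
def squeezeGo : List Char → Option Char → List Char → List Char
  | [], _, out => out.reverse
  | c :: rest, nxt, out =>
    if c == ' ' then
      let rest' := rest.dropWhile (· == ' ')
      let follow := match rest'.head? with | some x => some x | none => nxt
      let out' := if isW? out.head? && isW? follow then ' ' :: out else out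
      squeezeGo rest' nxt out'
    else squeezeGo rest nxt (c :: out)
  termination_by l => l.length
  decreasing_by
    · simp only [List.length_cons]
      have := List.length_dropWhile_le (p := (· == ' ')) (l := rest)
      omega
    · simp

-- _compactCode's outer while loop over rest.
def runB (rest : List Char) : List Char :=
  match minCut rest with
  | none => squeezeGo rest none []
  | some cut =>
    match h2 : rest.drop cut with
    | [] => squeezeGo rest none []   -- unreachable: a found cut is inside the list
    | c :: after =>
      if c == '"' then
        let litLen := match findSub ['"'] after with
                      | none => after.length
                      | some e => e + 1
        squeezeGo (rest.take cut) (some c) [] ++ (c :: after.take litLen) ++ runB (after.drop litLen)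
      else
        squeezeGo (rest.take cut) (some c) [] ++ (c :: after)
  termination_by rest.length
  decreasing_by
    have hlen : after.length + 1 = rest.length - cut := by
      have := congrArg List.length h2
      simpa using this.symm
    simp only [List.length_drop]
    omega

def compactCode_py_alt (code : String) : String :=
  String.ofList (runB code.toList)

-- ===== PRECONDITION & SPEC =====
def Spec_compactCode_py (code : String) (out : String) : Prop := out = compactCode_py_alt code
instance (code : String) (out : String) : Decidable (Spec_compactCode_py code out) := by unfold Spec_compactCode_py; infer_instance

-- ===== CLAIM (what is proved, stated in full; the proofs are below) =====
def Claim_equal_compactCode_py : Prop := ∀ (code : String), Dom_compactCode_py code → Spec_compactCode_py code (compactCode_py code)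

-- ===== LEMMAS AND PROOFS =====

-- B's split-state view: runB's body with the squeeze accumulator seeded with `out`.
def Bst (rest : List Char) (out : List Char) : List Char :=
  match minCut rest with
  | none => squeezeGo rest none out
  | some cut =>
    match h2 : rest.drop cut with
    | [] => squeezeGo rest none out
    | c :: after =>
      if c == '"' then
        let litLen := match findSub ['"'] after with
                      | none => after.length
                      | some e => e + 1
        squeezeGo (rest.take cut) (some c) out ++ (c :: after.take litLen) ++ runB (after.drop litLen)
      else
        squeezeGo (rest.take cut) (some c) out ++ (c :: after)

theorem Bst_runB (rest : List Char) : Bst rest [] = runB rest := by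
  rw [runB, Bst]

theorem headW (out buf0 : List Char) (h : out = [] → isW? buf0.head? = false) :
    isW? (out ++ buf0).head? = isW? out.head? := by
  cases out with
  | nil => simpa using h rfl
  | cons a t => simp

-- After REM/DATA, runA copies the rest verbatim (for any in_string flag).
theorem litRun (l : List Char) : ∀ (inStr : Bool) buf, runA l inStr true buf = buf.reverse ++ l := by
  induction l with
  | nil => intro inStr buf; simp [runA]
  | cons c rtl ih =>
    intro inStr buf
    rw [runA]
    by_cases h : inStr <;> simp [h, ih]

-- String mode runs verbatim to the first closing quote.
theorem strRun (l : List Char) : ∀ buf, runA l true false buf =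
    match findSub ['"'] l with
    | none => buf.reverse ++ l
    | some e => runA (l.drop (e + 1)) false false ((l.take (e + 1)).reverse ++ buf) := by
  induction l with
  | nil => intro buf; simp [runA, findSub]
  | cons c rtl ih =>
    intro buf
    rw [runA, findSub]
    by_cases h : c = '"'
    · subst h; simp [List.take]
    · have hx : ((c :: rtl).take (['"'].length) == ['"']) = false := by
        simp [List.take, h]
      have hb : (c != '"') = true := by simp [h]
      simp only [hx, Bool.false_eq_true, if_false, if_true]
      rw [hb, ih]
      cases hf : findSub ['"'] rtl with
      | none => simp [hf]
      | some e => simp [hf, List.take_succ_cons, List.drop_succ_cons]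

-- findSub of a single char finds that char.
theorem findSub_single (p : Char) (l : List Char) : ∀ e, findSub [p] l = some e →
    l.take (e + 1) = l.take e ++ [p] := by
  induction l with
  | nil => intro e h; simp [findSub] at h
  | cons c rtl ih =>
    intro e h
    rw [findSub] at h
    by_cases hc : c = p
    · subst hc
      simp [List.take] at h
      subst h
      simp [List.take]
    · have hx : ((c :: rtl).take ([p].length) == [p]) = false := by simp [List.take, hc]
      rw [hx] at h
      simp only [Bool.false_eq_true, if_false, Option.map_eq_some_iff] at h
      obtain ⟨e', he', rfl⟩ := h
      simp [List.take_succ_cons, ih e' he']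

theorem minCut_nil : minCut [] = none := by decide

-- shifting by one non-cut character
theorem minCut_shift (c : Char) (rtl : List Char)
    (h1 : ((c :: rtl).take 1 == ['"']) = false)
    (h2 : ((c :: rtl).take 3 == ['R','E','M']) = false)
    (h3 : ((c :: rtl).take 4 == ['D','A','T','A']) = false) :
    minCut (c :: rtl) = (minCut rtl).map (· + 1) := by
  unfold minCut
  rw [findSub, findSub, findSub]
  simp only [List.length_cons, List.length_nil, h1, h2, h3, Bool.false_eq_true, if_false]
  cases findSub ['"'] rtl <;> cases findSub ['R','E','M'] rtl <;>
    cases findSub ['D','A','T','A'] rtl <;> simp [List.min?] <;> omega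

-- min? of the candidate list when one candidate is 0
theorem min0 (o1 o2 o3 : Option Nat) (h : o1 = some 0 ∨ o2 = some 0 ∨ o3 = some 0) :
    ([o1, o2, o3].filterMap id).min? = some 0 := by
  cases o1 <;> cases o2 <;> cases o3 <;> simp_all [List.min?] <;> omega

-- if any pattern matches at position 0, the cut is 0
theorem minCut_zero (l : List Char)
    (h : ((l.take 1 == ['"']) = true) ∨ ((l.take 3 == ['R','E','M']) = true) ∨
         ((l.take 4 == ['D','A','T','A']) = true)) :
    minCut l = some 0 := by
  cases l with
  | nil => simp [List.take] at h
  | cons c rtl =>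
    unfold minCut
    apply min0
    rcases h with h | h | h
    · have h' : ((c :: rtl).take (['"'] : List Char).length == ['"']) = true := h
      left; rw [findSub, if_pos h']
    · have h' : ((c :: rtl).take (['R','E','M'] : List Char).length == ['R','E','M']) = true := h
      right; left; rw [findSub, if_pos h']
    · have h' : ((c :: rtl).take (['D','A','T','A'] : List Char).length == ['D','A','T','A']) = true := h
      right; right; rw [findSub, if_pos h']


theorem squeezeGo_nil (nxt : Option Char) (out : List Char) : squeezeGo [] nxt out = out.reverse := by
  rw [squeezeGo]

theorem squeezeGo_nospace (c : Char) (h : (c == ' ') = false) (rest : List Char) (nxt : Option Char)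
    (out : List Char) : squeezeGo (c :: rest) nxt out = squeezeGo rest nxt (c :: out) := by
  rw [squeezeGo]; simp [h]

theorem squeezeGo_space (rest : List Char) (nxt : Option Char) (out : List Char) :
    squeezeGo (' ' :: rest) nxt out =
      squeezeGo (rest.dropWhile (· == ' ')) nxt
        (if isW? out.head? &&
            isW? (match (rest.dropWhile (· == ' ')).head? with | some x => some x | none => nxt)
         then ' ' :: out else out) := by
  rw [squeezeGo]; simp

theorem runB_nil : runB [] = [] := by
  rw [runB, minCut_nil]
  exact squeezeGo_nil none []

theorem Bst_nilL (out : List Char) : Bst [] out = out.reverse := by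
  unfold Bst; rw [minCut_nil]; exact squeezeGo_nil none out

def litLenD (after : List Char) : Nat :=
  match findSub ['"'] after with
  | none => after.length
  | some e => e + 1

theorem Bst_none (rest out : List Char) (hm : minCut rest = none) :
    Bst rest out = squeezeGo rest none out := by
  unfold Bst; rw [hm]

theorem Bst_some_nil (rest out : List Char) (cut : Nat) (hm : minCut rest = some cut)
    (hd : rest.drop cut = []) : Bst rest out = squeezeGo rest none out := by
  unfold Bst; rw [hm]
  split
  · rename_i h; simp at h
  · rename_i cut' h2
    injection h2 with hcut
    subst hcut
    split
    · rfl
    · rename_i c' after' h3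
      rw [hd] at h3; simp at h3

theorem Bst_some_cons (rest out : List Char) (cut : Nat) (c : Char) (after : List Char)
    (hm : minCut rest = some cut) (hd : rest.drop cut = c :: after) :
    Bst rest out = if (c == '"') = true
      then squeezeGo (rest.take cut) (some c) out ++ (c :: after.take (litLenD after)) ++
             runB (after.drop (litLenD after))
      else squeezeGo (rest.take cut) (some c) out ++ (c :: after) := by
  unfold Bst; rw [hm]
  split
  · rename_i h; simp at h
  · rename_i cut' h2
    injection h2 with hcut
    subst hcut
    split
    · rename_i h3; rw [hd] at h3; simp at h3
    · rename_i c' after' h3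
      rw [hd] at h3
      injection h3 with hc ha
      subst hc; subst ha
      rfl

theorem dropWhile_spaces (sp x : List Char) (hsp : ∀ a ∈ sp, a = ' ')
    (hx : x.head? = none ∨ ∃ h, x.head? = some h ∧ (h == ' ') = false) :
    (sp ++ x).dropWhile (· == ' ') = x := by
  induction sp with
  | nil =>
    cases x with
    | nil => rfl
    | cons h t =>
      rcases hx with hx | ⟨h', hh', hns⟩
      · simp at hx
      · simp at hh'; subst hh'; simp [List.dropWhile_cons, hns]
  | cons s sp' ih =>
    have hs : s = ' ' := hsp s (by simp)
    subst hs
    simp only [List.cons_append, List.dropWhile_cons]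
    simp only [show ((' ' : Char) == ' ') = true from rfl, if_true]
    exact ih (fun a ha => hsp a (by simp [ha]))

theorem dropWhile_head (l : List Char) :
    ((l.dropWhile (· == ' ')).head? = none) ∨
      ∃ h, (l.dropWhile (· == ' ')).head? = some h ∧ (h == ' ') = false := by
  induction l with
  | nil => left; rfl
  | cons c t ih =>
    by_cases hc : (c == ' ') = true
    · simpa [List.dropWhile_cons, hc] using ih
    · have hc' : (c == ' ') = false := by simpa using hc
      right; exact ⟨c, by simp [List.dropWhile_cons, hc'], hc'⟩

theorem minCut_spaces (sp m : List Char) (hsp : ∀ a ∈ sp, a = ' ') :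
    minCut (sp ++ m) = (minCut m).map (· + sp.length) := by
  induction sp with
  | nil =>
    simp only [List.nil_append, List.length_nil]
    cases h : minCut m <;> simp [h]
  | cons s sp' ih =>
    have hs : s = ' ' := hsp s (by simp)
    subst hs
    rw [List.cons_append,
      minCut_shift ' ' (sp' ++ m) (by simp [List.take_succ_cons]) (by simp [List.take_succ_cons])
        (by simp [List.take_succ_cons]),
      ih (fun a ha => hsp a (by simp [ha]))]
    cases minCut m <;> simp <;> omega

theorem Bst_space (rtl out : List Char) :
    Bst (' ' :: rtl) out =
      Bst (rtl.dropWhile (· == ' '))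
        (if isW? out.head? && isW? ((rtl.dropWhile (· == ' ')).head?) then ' ' :: out else out) := by
  have hmh := dropWhile_head rtl
  set m := rtl.dropWhile (· == ' ') with hm
  set spt := rtl.takeWhile (· == ' ') with hspt
  have hsptall : ∀ a ∈ spt, a = ' ' := by
    intro a ha
    have := List.mem_takeWhile_imp (p := (· == ' ')) (by simpa [hspt] using ha)
    simpa using this
  have hspall : ∀ a ∈ (' ' :: spt), a = ' ' := by
    intro a ha; rcases List.mem_cons.mp ha with rfl | h
    · rfl
    · exact hsptall a h
  have hl : ' ' :: rtl = ' ' :: spt ++ m := by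
    simp [hspt, hm, List.takeWhile_append_dropWhile]
  set out' := if isW? out.head? && isW? m.head? then ' ' :: out else out with hout'
  have hstep : ∀ (nxt : Option Char),
      (isW? (match m.head? with | some x => some x | none => nxt) = isW? m.head?) →
      ∀ x, (spt ++ x).dropWhile (· == ' ') = x →
      ((match x.head? with | some a => some a | none => nxt) =
        (match m.head? with | some a => some a | none => nxt)) →
      squeezeGo (' ' :: (spt ++ x)) nxt out = squeezeGo x nxt
        (if isW? out.head? && isW? m.head? then ' ' :: out else out) := by
    intro nxt hnw x hdw hfx
    rw [squeezeGo_space, hdw, hfx, hnw]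
  cases hk : minCut m with
  | none =>
    have hmc : minCut (' ' :: rtl) = none := by
      rw [hl, minCut_spaces _ _ hspall, hk]; rfl
    rw [Bst_none _ _ hmc, Bst_none _ _ hk, hl, List.cons_append]
    exact hstep none (by cases m.head? <;> rfl) m (dropWhile_spaces spt m hsptall hmh) rfl
  | some k =>
    have hmc : minCut (' ' :: rtl) = some (k + (' ' :: spt).length) := by
      rw [hl, minCut_spaces _ _ hspall, hk]; rfl
    have hdropE : (' ' :: rtl).drop (k + (' ' :: spt).length) = m.drop k := by
      rw [hl, Nat.add_comm]
      exact List.drop_length_add_append k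
    have htakeE : (' ' :: rtl).take (k + (' ' :: spt).length) = (' ' :: spt) ++ m.take k := by
      rw [hl, Nat.add_comm]
      exact List.take_length_add_append k
    cases hd : m.drop k with
    | nil =>
      rw [Bst_some_nil _ _ _ hmc (by rw [hdropE, hd]), Bst_some_nil _ _ _ hk hd, hl,
        List.cons_append]
      exact hstep none (by cases m.head? <;> rfl) m (dropWhile_spaces spt m hsptall hmh) rfl
    | cons c after =>
      have hmne : m ≠ [] := by
        intro hnil; rw [hnil] at hd; simp at hd
      have hxh : (m.take k).head? = none ∨ ∃ h, (m.take k).head? = some h ∧ (h == ' ') = false := by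
        cases k with
        | zero => left; simp
        | succ k' =>
          rw [List.head?_take]
          simp only [show k' + 1 ≠ 0 by omega, if_false]
          simpa using hmh
      have hfx : (match (m.take k).head? with | some a => some a | none => some c) =
          (match m.head? with | some a => some a | none => some c) := by
        cases k with
        | zero =>
          simp only [List.take_zero, List.head?_nil]
          have hmc2 : m = c :: after := by simpa using hd
          rw [hmc2]; rfl
        | succ k' =>
          rw [List.head?_take]
          simp [show k' + 1 ≠ 0 by omega]
      rw [Bst_some_cons _ _ _ _ _ hmc (by rw [hdropE, hd]), Bst_some_cons _ _ _ _ _ hk hd,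
        htakeE, List.cons_append]
      rw [hstep (some c)
        (by
          cases hmm : m.head? with
          | none => rw [List.head?_eq_none_iff] at hmm; exact absurd hmm hmne
          | some a => rfl)
        (m.take k) (dropWhile_spaces spt (m.take k) hsptall hxh) hfx]

theorem Bst_plain (ch : Char) (rtl out : List Char)
    (h1 : ((ch :: rtl).take 1 == ['"']) = false)
    (h2 : ((ch :: rtl).take 3 == ['R','E','M']) = false)
    (h3 : ((ch :: rtl).take 4 == ['D','A','T','A']) = false)
    (hsp : (ch == ' ') = false) :
    Bst (ch :: rtl) out = Bst rtl (ch :: out) := by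
  cases hk : minCut rtl with
  | none =>
    have hm1 : minCut (ch :: rtl) = none := by
      rw [minCut_shift ch rtl h1 h2 h3, hk]; rfl
    rw [Bst_none _ _ hm1, Bst_none _ _ hk]
    exact squeezeGo_nospace ch hsp rtl none out
  | some k =>
    have hm1 : minCut (ch :: rtl) = some (k + 1) := by
      rw [minCut_shift ch rtl h1 h2 h3, hk]; rfl
    cases hd : rtl.drop k with
    | nil =>
      rw [Bst_some_nil _ _ _ hm1 (by rw [List.drop_succ_cons, hd]), Bst_some_nil _ _ _ hk hd]
      exact squeezeGo_nospace ch hsp rtl none out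
    | cons c after =>
      rw [Bst_some_cons _ _ _ _ _ hm1 (by rw [List.drop_succ_cons, hd]),
        Bst_some_cons _ _ _ _ _ hk hd, List.take_succ_cons,
        squeezeGo_nospace ch hsp (rtl.take k) (some c) out]

theorem G : ∀ (n : Nat) (l out buf0 : List Char), l.length ≤ n →
    (out = [] → isW? buf0.head? = false) →
    runA l false false (out ++ buf0) = buf0.reverse ++ Bst l out := by
  intro n
  induction n with
  | zero =>
    intro l out buf0 hlen hw
    have hnil : l = [] := by cases l with
      | nil => rfl
      | cons a t => simp at hlen
    subst hnil
    rw [runA, Bst_nilL]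
    simp
  | succ n ih =>
    intro l out buf0 hlen hw
    cases l with
    | nil => rw [runA, Bst_nilL]; simp
    | cons ch rtl =>
      have hlen' : rtl.length ≤ n := by simpa using hlen
      rw [runA]
      simp only [Bool.false_eq_true, if_false]
      by_cases hq : ch = '"'
      · -- opening quote
        subst hq
        simp only [show (('"' : Char) == '"') = true from rfl, if_true]
        rw [strRun]
        have hm : minCut ('"' :: rtl) = some 0 :=
          minCut_zero _ (Or.inl (by simp [List.take_succ_cons]))
        cases hf : findSub ['"'] rtl with
        | none =>
          have hbst : Bst ('"' :: rtl) out =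
              out.reverse ++ ('"' :: rtl.take rtl.length) ++ runB (rtl.drop rtl.length) := by
            unfold Bst
            rw [hm]
            simp only [List.drop_zero, List.take_zero]
            simp only [show (('"' : Char) == '"') = true from rfl, if_true, hf]
            rw [squeezeGo_nil]
          rw [hbst]
          simp [List.drop_length, runB_nil, List.take_length]
        | some e =>
          have htk := findSub_single '"' rtl e hf
          have hw1 : isW? ((rtl.take (e + 1)).reverse ++ ('"' :: (out ++ buf0))).head? = false := by
            rw [htk]
            simp only [List.reverse_append, List.reverse_cons]
            simp [isW?, wordChar]
          have hle : (rtl.drop (e + 1)).length ≤ n := by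
            simp only [List.length_drop]; omega
          have hih := ih (rtl.drop (e + 1)) [] ((rtl.take (e + 1)).reverse ++ ('"' :: (out ++ buf0)))
            hle (fun _ => hw1)
          simp only [List.nil_append] at hih
          show runA (List.drop (e + 1) rtl) false false
              ((List.take (e + 1) rtl).reverse ++ '"' :: (out ++ buf0)) =
            buf0.reverse ++ Bst ('"' :: rtl) out
          rw [hih, Bst_runB]
          have hbst : Bst ('"' :: rtl) out =
              out.reverse ++ ('"' :: rtl.take (e + 1)) ++ runB (rtl.drop (e + 1)) := by
            unfold Bst
            rw [hm]
            simp only [List.drop_zero, List.take_zero]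
            simp only [show (('"' : Char) == '"') = true from rfl, if_true, hf]
            rw [squeezeGo_nil]
          rw [hbst]
          simp [List.reverse_append, List.append_assoc]
      · have hqb : (ch == '"') = false := by simp [hq]
        simp only [hqb, Bool.false_eq_true, if_false]
        by_cases hR : (((ch :: rtl).take 3) == ['R','E','M']) = true
        · -- REM
          simp only [hR, if_true]
          rw [litRun]
          have htake : (ch :: rtl).take 3 = ['R','E','M'] := eq_of_beq hR
          have hm : minCut (ch :: rtl) = some 0 := minCut_zero _ (Or.inr (Or.inl hR))
          have hchR : ch = 'R' := by
            simp only [List.take_succ_cons, List.cons.injEq] at htake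
            exact htake.1
          have hbst : Bst (ch :: rtl) out = out.reverse ++ (ch :: rtl) := by
            unfold Bst
            rw [hm]
            simp only [List.drop_zero, List.take_zero]
            rw [show (ch == '"') = false from hqb]
            simp only [Bool.false_eq_true, if_false]
            rw [squeezeGo_nil]
          rw [hbst]
          conv_rhs => rw [show (ch :: rtl) = (ch :: rtl).take 3 ++ (ch :: rtl).drop 3 from
            (List.take_append_drop 3 (ch :: rtl)).symm]
          rw [htake]
          simp [List.append_assoc]
        · have hRb : (((ch :: rtl).take 3) == ['R','E','M']) = false := by
            simpa using hR
          simp only [hRb, Bool.false_eq_true, if_false]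
          by_cases hD : (((ch :: rtl).take 4) == ['D','A','T','A']) = true
          · -- DATA
            simp only [hD, if_true]
            rw [litRun]
            have htake : (ch :: rtl).take 4 = ['D','A','T','A'] := eq_of_beq hD
            have hm : minCut (ch :: rtl) = some 0 := minCut_zero _ (Or.inr (Or.inr hD))
            have hbst : Bst (ch :: rtl) out = out.reverse ++ (ch :: rtl) := by
              unfold Bst
              rw [hm]
              simp only [List.drop_zero, List.take_zero]
              rw [show (ch == '"') = false from hqb]
              simp only [Bool.false_eq_true, if_false]
              rw [squeezeGo_nil]
            rw [hbst]
            conv_rhs => rw [show (ch :: rtl) = (ch :: rtl).take 4 ++ (ch :: rtl).drop 4 from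
              (List.take_append_drop 4 (ch :: rtl)).symm]
            rw [htake]
            simp [List.append_assoc]
          · have hDb : (((ch :: rtl).take 4) == ['D','A','T','A']) = false := by
              simpa using hD
            simp only [hDb, Bool.false_eq_true, if_false]
            by_cases hsp : ch = ' '
            · -- space run
              subst hsp
              simp only [show ((' ' : Char) == ' ') = true from rfl, if_true]
              rw [headW out buf0 hw]
              set m := rtl.dropWhile (· == ' ') with hmdef
              set out' := if isW? out.head? && isW? m.head? then ' ' :: out else out with hout'
              have hbuf : (if isW? out.head? && isW? m.head? then ' ' :: (out ++ buf0) else out ++ buf0)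
                  = out' ++ buf0 := by
                by_cases hcnd : (isW? out.head? && isW? m.head?) = true
                · simp [hout', hcnd]
                · simp only [Bool.not_eq_true] at hcnd
                  simp [hout', hcnd]
              have hlenm : m.length ≤ n := by
                rw [hmdef]
                have := List.length_dropWhile_le (p := (· == ' ')) (l := rtl)
                omega
              have hw' : out' = [] → isW? buf0.head? = false := by
                intro h
                apply hw
                by_cases hcnd : (isW? out.head? && isW? m.head?) = true
                · rw [hout'] at h; simp [hcnd] at h
                · simp only [Bool.not_eq_true] at hcnd
                  rw [hout'] at h; simpa [hcnd] using h
              rw [hbuf, ih m out' buf0 hlenm hw']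
              rw [Bst_space rtl out]
            · -- plain character
              have hspb : (ch == ' ') = false := by simp [hsp]
              simp only [hspb, Bool.false_eq_true, if_false]
              have : ch :: (out ++ buf0) = (ch :: out) ++ buf0 := rfl
              rw [this, ih rtl (ch :: out) buf0 hlen' (by simp)]
              rw [Bst_plain ch rtl out (by simpa [List.take_succ_cons] using hq) hRb hDb hspb]

theorem main_lemma (l : List Char) : runA l false false [] = runB l := by
  have := G l.length l [] [] (le_refl _) (by intro _; rfl)
  simpa [Bst_runB] using this

-- ===== VERDICT (by name: the statement is the Claim_ definition above) =====
theorem compactCode_py_spec : Claim_equal_compactCode_py := by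
  intro code _
  unfold Spec_compactCode_py compactCode_py compactCode_py_alt
  rw [main_lemma code.toList]
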